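-- pv_equiv track=rewrite | github.com/dashton956-alt/POC | example-orchestrator/workflows/tasks/import_vendors.py | create_vendor_slug
-- ===== SOURCE A (Python) =====
-- def create_vendor_slug(vendor_name: str) -> str:
--     """
--     Create a NetBox-compatible slug from vendor name.
--
--     Args:
--         vendor_name: Original vendor name
--
--     Returns:
--         Slug-compatible string
--     """
--     # Replace spaces and special characters with hyphens
--     slug = vendor_name.lower()
--     slug = slug.replace(' ', '-')
--     slug = slug.replace('&', 'and')
--     slug = slug.replace('.', '')
--     slug = slug.replace(',', '')
--     slug = slug.replace('(', '')
--     slug = slug.replace(')', '')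
--     slug = slug.replace('/', '-')
--     slug = slug.replace('\\', '-')
--
--     # Remove multiple consecutive hyphens
--     while '--' in slug:
--         slug = slug.replace('--', '-')
--
--     # Remove leading/trailing hyphens
--     slug = slug.strip('-')
--
--     return slug
-- ===== SOURCE B (Python) =====
-- def create_vendor_slug(vendor_name: str) -> str:
--     """
--     Create a NetBox-compatible slug from vendor name.
--
--     Single left-to-right pass: map each character of the lowercased name
--     (' ', '/', '\\' -> '-'; '.', ',', '(', ')' -> dropped; '&' -> 'and'),
--     collapsing consecutive hyphens on the fly, then strip hyphens at the ends.
--     """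
--     out = []
--     for ch in vendor_name.lower():
--         if ch in (' ', '/', '\\'):
--             if not (out and out[-1] == '-'):
--                 out.append('-')
--         elif ch in ('.', ',', '(', ')'):
--             pass
--         elif ch == '&':
--             out.append('a')
--             out.append('n')
--             out.append('d')
--         else:
--             if not (ch == '-' and out and out[-1] == '-'):
--                 out.append(ch)
--     return ''.join(out).strip('-')
-- ===== Notes on version B (the rewrite author's own statement) =====
-- stated objective: alternative
-- what changed: Replaced the eight global str.replace scans plus the re-scanning while-loop hyphen collapse with one left-to-right pass that maps each character and collapses hyphen runs on the fly before a final strip.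
import Mathlib
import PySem

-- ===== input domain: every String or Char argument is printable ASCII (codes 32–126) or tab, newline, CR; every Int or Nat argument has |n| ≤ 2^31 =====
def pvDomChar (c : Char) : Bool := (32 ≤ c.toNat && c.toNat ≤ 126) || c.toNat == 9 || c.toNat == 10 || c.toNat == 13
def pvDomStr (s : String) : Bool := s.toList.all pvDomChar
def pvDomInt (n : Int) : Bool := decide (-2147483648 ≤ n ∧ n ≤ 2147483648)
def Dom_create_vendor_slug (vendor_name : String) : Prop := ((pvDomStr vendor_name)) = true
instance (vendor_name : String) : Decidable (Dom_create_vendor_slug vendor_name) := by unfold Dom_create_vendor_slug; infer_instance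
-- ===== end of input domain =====

-- B replaces A's eight global .replace scans and re-scanning while loop by one left-to-right
-- pass that maps each character and collapses hyphen runs on the fly (objective: alternative).

-- ===== PORT A =====
-- onepass and the two lemmas below are needed by the port's termination proof (decreasing_by):
-- one global pass of slug.replace('--', '-') as a structural function, and the fact that it
-- strictly shortens the string whenever '--' occurs in it.

/-- One global pass of `.replace('--', '-')` (left-to-right, non-overlapping). -/
def onepass : List Char → List Char
  | [] => []
  | [c] => [c]
  | c1 :: c2 :: t =>
    if c1 = '-' ∧ c2 = '-' then '-' :: onepass t else c1 :: onepass (c2 :: t)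

theorem go_dd (fuel : Nat) : ∀ (l acc : List Char), l.length ≤ fuel →
    PySem.Chars.replace.go ['-', '-'] ['-'] fuel l acc = acc.reverse ++ onepass l := by
  induction fuel with
  | zero =>
    intro l acc h
    have : l = [] := List.eq_nil_of_length_eq_zero (Nat.le_zero.mp h)
    subst this
    simp [PySem.Chars.replace.go, onepass]
  | succ n ih =>
    intro l acc h
    match l with
    | [] => simp [PySem.Chars.replace.go, onepass]
    | [c] =>
      have hp : ¬ (['-', '-'].isPrefixOf [c] = true) := by simp [List.isPrefixOf]
      simp only [PySem.Chars.replace.go, hp, Bool.false_eq_true]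
      rw [ih [] (c :: acc) (by simp)]
      simp [onepass]
    | c1 :: c2 :: t =>
      by_cases hdd : c1 = '-' ∧ c2 = '-'
      · obtain ⟨h1, h2⟩ := hdd
        subst h1; subst h2
        have hp : ['-', '-'].isPrefixOf ('-' :: '-' :: t) = true := by
          simp [List.isPrefixOf]
        simp only [PySem.Chars.replace.go, hp, if_pos]
        rw [show List.drop ['-','-'].length ('-' :: '-' :: t) = t from rfl]
        rw [ih t (['-'].reverse ++ acc) (by simp at h ⊢; omega)]
        simp [onepass]
      · have hp : ¬ (['-', '-'].isPrefixOf (c1 :: c2 :: t) = true) := by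
          simp [List.isPrefixOf]
          intro h1 h2
          exact absurd ⟨h1.symm, h2.symm⟩ hdd
        simp only [PySem.Chars.replace.go, hp, Bool.false_eq_true]
        rw [ih (c2 :: t) (c1 :: acc) (by simp at h ⊢; omega)]
        simp [onepass, hdd]

theorem replace_dd (l : List Char) :
    PySem.Chars.replace l ['-', '-'] ['-'] = onepass l := by
  have := go_dd l.length l [] (le_refl _)
  simpa [PySem.Chars.replace] using this

/-- Boolean "contains two adjacent hyphens". -/
def hasDD : List Char → Bool
  | c1 :: c2 :: t => (decide (c1 = '-') && decide (c2 = '-')) || hasDD (c2 :: t)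
  | _ => false

theorem infix_dd_iff (l : List Char) : (['-', '-'] <:+: l) ↔ hasDD l = true := by
  induction l with
  | nil => simp [hasDD]
  | cons c t ih =>
    rw [List.infix_cons_iff]
    match t with
    | [] =>
      constructor
      · rintro (hpre | hinf)
        · exact absurd hpre.length_le (by simp)
        · exact absurd hinf.length_le (by simp)
      · intro h; simp [hasDD] at h
    | c2 :: t' =>
      constructor
      · rintro (hpre | hinf)
        · rcases hpre with ⟨r, hr⟩
          simp at hr
          obtain ⟨h1, h2, _⟩ := hr
          subst h1; subst h2
          simp [hasDD]
        · have := ih.mp hinf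
          simp [hasDD, this]
      · intro h
        simp only [hasDD, Bool.or_eq_true, Bool.and_eq_true, decide_eq_true_eq] at h
        rcases h with ⟨h1, h2⟩ | h
        · exact Or.inl (by subst h1; subst h2; exact ⟨t', rfl⟩)
        · exact Or.inr (ih.mpr h)

theorem onepass_length_le (l : List Char) : (onepass l).length ≤ l.length := by
  induction l using onepass.induct with
  | case1 => simp [onepass]
  | case2 c => simp [onepass]
  | case3 c1 c2 t h ih => simp only [onepass, if_pos h]; simp at ih ⊢; omega
  | case4 c1 c2 t h ih => simp only [onepass, if_neg h]; simp at ih ⊢; omega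

theorem onepass_length_lt (l : List Char) (h : hasDD l = true) :
    (onepass l).length < l.length := by
  induction l using onepass.induct with
  | case1 => simp [hasDD] at h
  | case2 c => simp [hasDD] at h
  | case3 c1 c2 t hdd ih =>
    have := onepass_length_le t
    simp only [onepass, if_pos hdd]
    simp at this ⊢; omega
  | case4 c1 c2 t hdd ih =>
    simp only [onepass, if_neg hdd]
    have hh : hasDD (c2 :: t) = true := by
      simp only [hasDD, Bool.or_eq_true, Bool.and_eq_true, decide_eq_true_eq] at h
      rcases h with ⟨h1, h2⟩ | h
      · exact absurd ⟨h1, h2⟩ hdd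
      · exact h
    have := ih hh
    simp at this ⊢; omega

theorem replace_dd_str_lt (s : String) (h : PySem.Str.isIn "--" s = true) :
    (PySem.Str.replace s "--" "-").toList.length < s.toList.length := by
  have hinf : "--".toList <:+: s.toList := (PySem.Str.isIn_iff_infix _ _).mp h
  have hdd : hasDD s.toList = true := (infix_dd_iff s.toList).mp hinf
  have : (PySem.Str.replace s "--" "-").toList = onepass s.toList := by
    simp [PySem.Str.replace, String.toList_ofList]
    exact replace_dd s.toList
  rw [this]
  exact onepass_length_lt s.toList hdd

/-- Port of A's `while '--' in slug: slug = slug.replace('--', '-')`. -/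
def collapseA (s : String) : String :=
  if h : PySem.Str.isIn "--" s = true then collapseA (PySem.Str.replace s "--" "-")
  else s
termination_by s.toList.length
decreasing_by exact replace_dd_str_lt s h

def create_vendor_slug (vendor_name : String) : String :=
  let slug := PySem.Str.lower vendor_name
  let slug := PySem.Str.replace slug " " "-"
  let slug := PySem.Str.replace slug "&" "and"
  let slug := PySem.Str.replace slug "." ""
  let slug := PySem.Str.replace slug "," ""
  let slug := PySem.Str.replace slug "(" ""
  let slug := PySem.Str.replace slug ")" ""
  let slug := PySem.Str.replace slug "/" "-"
  let slug := PySem.Str.replace slug "\\" "-"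
  let slug := collapseA slug
  PySem.Str.stripChars slug "-"

-- ===== PORT B =====
/-- Port of B's loop body: one character of the single pass. -/
def bstep (out : List Char) (ch : Char) : List Char :=
  if ch = ' ' ∨ ch = '/' ∨ ch = '\\' then
    if ¬ (out ≠ [] ∧ out.getLast? = some '-') then out ++ ['-'] else out
  else if ch = '.' ∨ ch = ',' ∨ ch = '(' ∨ ch = ')' then out
  else if ch = '&' then ((out ++ ['a']) ++ ['n']) ++ ['d']
  else if ch = '-' ∧ out ≠ [] ∧ out.getLast? = some '-' then out
  else out ++ [ch]

def create_vendor_slug_alt (vendor_name : String) : String :=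
  String.ofList
    (PySem.Chars.stripChars ((PySem.Chars.lower vendor_name.toList).foldl bstep []) ['-'])

-- ===== PRECONDITION & SPEC =====
def Spec_create_vendor_slug (vendor_name : String) (out : String) : Prop := out = create_vendor_slug_alt vendor_name
instance (vendor_name : String) (out : String) : Decidable (Spec_create_vendor_slug vendor_name out) := by unfold Spec_create_vendor_slug; infer_instance

-- ===== CLAIM (what is proved, stated in full; the proofs are below) =====
def Claim_equal_create_vendor_slug : Prop := ∀ (vendor_name : String), Dom_create_vendor_slug vendor_name → Spec_create_vendor_slug vendor_name (create_vendor_slug vendor_name)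

-- ===== LEMMAS AND PROOFS =====

/-- The per-character map the eight single-character replaces amount to. -/
def cmap (c : Char) : List Char :=
  if c = ' ' ∨ c = '/' ∨ c = '\\' then ['-']
  else if c = '.' ∨ c = ',' ∨ c = '(' ∨ c = ')' then []
  else if c = '&' then ['a', 'n', 'd']
  else [c]

/-- Collapse runs of hyphens, knowing the last emitted character. -/
def squeeze2 : Option Char → List Char → List Char
  | _, [] => []
  | last, c :: t =>
    if c = '-' ∧ last = some '-' then squeeze2 last t
    else c :: squeeze2 (some c) t

-- replace with a single-character needle is a flatMap
theorem go_single (o : Char) (new : List Char) (fuel : Nat) :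
    ∀ (l acc : List Char), l.length ≤ fuel →
    PySem.Chars.replace.go [o] new fuel l acc
      = acc.reverse ++ l.flatMap (fun c => if c = o then new else [c]) := by
  induction fuel with
  | zero =>
    intro l acc h
    have : l = [] := List.eq_nil_of_length_eq_zero (Nat.le_zero.mp h)
    subst this
    simp [PySem.Chars.replace.go]
  | succ n ih =>
    intro l acc h
    match l with
    | [] => simp [PySem.Chars.replace.go]
    | c :: t =>
      by_cases hc : c = o
      · subst hc
        have hp : [c].isPrefixOf (c :: t) = true := by simp [List.isPrefixOf]
        simp only [PySem.Chars.replace.go, hp, if_pos]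
        rw [show List.drop [c].length (c :: t) = t from rfl]
        rw [ih t (new.reverse ++ acc) (by simp at h ⊢; omega)]
        simp
      · have hp : ¬ ([o].isPrefixOf (c :: t) = true) := by
          simp [List.isPrefixOf]
          exact fun h' => absurd h'.symm hc
        simp only [PySem.Chars.replace.go, hp, Bool.false_eq_true]
        rw [ih t (c :: acc) (by simp at h ⊢; omega)]
        simp [hc]

theorem replace_single (l : List Char) (o : Char) (new : List Char) :
    PySem.Chars.replace l [o] new = l.flatMap (fun c => if c = o then new else [c]) := by
  have := go_single o new l.length l [] (le_refl _)
  simpa [PySem.Chars.replace] using this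

-- the chain of the eight per-character flatMaps is cmap on each character
set_option maxHeartbeats 1000000 in
theorem chain_char (c : Char) :
    (((((((((if c = ' ' then ['-'] else [c]).flatMap
        (fun c => if c = '&' then ['a','n','d'] else [c])).flatMap
        (fun c => if c = '.' then [] else [c])).flatMap
        (fun c => if c = ',' then [] else [c])).flatMap
        (fun c => if c = '(' then [] else [c])).flatMap
        (fun c => if c = ')' then [] else [c])).flatMap
        (fun c => if c = '/' then ['-'] else [c])).flatMap
        (fun c => if c = '\\' then ['-'] else [c]))) = cmap c := by
  by_cases h1 : c = ' '
  · subst h1; decide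
  · by_cases h2 : c = '&'
    · subst h2; decide
    · by_cases h3 : c = '.'
      · subst h3; decide
      · by_cases h4 : c = ','
        · subst h4; decide
        · by_cases h5 : c = '('
          · subst h5; decide
          · by_cases h6 : c = ')'
            · subst h6; decide
            · by_cases h7 : c = '/'
              · subst h7; decide
              · by_cases h8 : c = '\\'
                · subst h8; decide
                · simp [h1, h2, h3, h4, h5, h6, h7, h8, cmap]

set_option maxHeartbeats 1000000 in
theorem chain_eq (t : List Char) :
    ((((((((t.flatMap (fun c => if c = ' ' then ['-'] else [c])).flatMap
        (fun c => if c = '&' then ['a','n','d'] else [c])).flatMap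
        (fun c => if c = '.' then [] else [c])).flatMap
        (fun c => if c = ',' then [] else [c])).flatMap
        (fun c => if c = '(' then [] else [c])).flatMap
        (fun c => if c = ')' then [] else [c])).flatMap
        (fun c => if c = '/' then ['-'] else [c])).flatMap
        (fun c => if c = '\\' then ['-'] else [c])) = t.flatMap cmap := by
  induction t with
  | nil => simp
  | cons c t ih =>
    simp only [List.flatMap_cons, List.flatMap_append]
    rw [ih, chain_char c]

-- the collapse loop computes squeeze2 none
theorem squeeze2_onepass (l : List Char) :
    ∀ last, squeeze2 last (onepass l) = squeeze2 last l := by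
  induction l using onepass.induct with
  | case1 => intro last; simp [onepass]
  | case2 c => intro last; simp [onepass]
  | case3 c1 c2 t h ih =>
    intro last
    obtain ⟨h1, h2⟩ := h
    subst h1; subst h2
    have e1 : onepass ('-' :: '-' :: t) = '-' :: onepass t := by simp [onepass]
    rw [e1]
    by_cases hl : last = some '-'
    · have e2 : squeeze2 last ('-' :: onepass t) = squeeze2 last (onepass t) := by
        simp [squeeze2, hl]
      have e3 : squeeze2 last ('-' :: '-' :: t) = squeeze2 last t := by
        simp [squeeze2, hl]
      rw [e2, e3, ih last]
    · have e2 : squeeze2 last ('-' :: onepass t) = '-' :: squeeze2 (some '-') (onepass t) := by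
        simp [squeeze2, hl]
      have e3 : squeeze2 last ('-' :: '-' :: t) = '-' :: squeeze2 (some '-') t := by
        simp [squeeze2, hl]
      rw [e2, e3, ih (some '-')]
  | case4 c1 c2 t h ih =>
    intro last
    have e1 : onepass (c1 :: c2 :: t) = c1 :: onepass (c2 :: t) := by simp [onepass, h]
    rw [e1]
    by_cases hl : c1 = '-' ∧ last = some '-'
    · have e2 : squeeze2 last (c1 :: onepass (c2 :: t)) = squeeze2 last (onepass (c2 :: t)) := by
        simp [squeeze2, hl.1, hl.2]
      have e3 : squeeze2 last (c1 :: c2 :: t) = squeeze2 last (c2 :: t) := by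
        simp [squeeze2, hl.1, hl.2]
      rw [e2, e3, ih last]
    · have e2 : squeeze2 last (c1 :: onepass (c2 :: t)) = c1 :: squeeze2 (some c1) (onepass (c2 :: t)) := by
        simp [squeeze2, hl]
      have e3 : squeeze2 last (c1 :: c2 :: t) = c1 :: squeeze2 (some c1) (c2 :: t) := by
        simp [squeeze2, hl]
      rw [e2, e3, ih (some c1)]

theorem squeeze2_id (l : List Char) :
    ∀ last, hasDD l = false → (last = some '-' → l.head? ≠ some '-') →
    squeeze2 last l = l := by
  induction l with
  | nil => intros; simp [squeeze2]
  | cons c t ih =>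
    intro last hdd hhead
    have hskip : ¬ (c = '-' ∧ last = some '-') := by
      rintro ⟨hc, hl⟩
      exact hhead hl (by simp [hc])
    simp only [squeeze2, if_neg hskip]
    congr 1
    apply ih (some c)
    · match t with
      | [] => simp [hasDD]
      | c2 :: t' =>
        simp only [hasDD, Bool.or_eq_false_iff] at hdd
        exact hdd.2
    · intro hc hth
      have hc' : c = '-' := by injection hc
      match t with
      | [] => simp at hth
      | c2 :: t' =>
        simp only [hasDD, Bool.or_eq_false_iff, Bool.and_eq_false_iff] at hdd
        simp at hth
        rcases hdd.1 with h | h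
        · simp at h; exact h hc'
        · simp at h; exact h hth

theorem collapseA_toList (s : String) :
    (collapseA s).toList = squeeze2 none s.toList := by
  induction s using collapseA.induct with
  | case1 s h ih =>
    rw [collapseA]; rw [dif_pos h, ih]
    have hr : (PySem.Str.replace s "--" "-").toList = onepass s.toList := by
      simp [PySem.Str.replace, String.toList_ofList]
      exact replace_dd s.toList
    rw [hr, squeeze2_onepass]
  | case2 s h =>
    rw [collapseA]; rw [dif_neg h]
    have : hasDD s.toList = false := by
      rcases Bool.eq_false_or_eq_true (hasDD s.toList) with ht | hf
      · have hinf : ("--" : String).toList <:+: s.toList := by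
          rw [show ("--" : String).toList = ['-', '-'] from rfl]
          exact (infix_dd_iff s.toList).mpr ht
        exact absurd ((PySem.Str.isIn_iff_infix _ _).mpr hinf) h
      · exact hf
    exact (squeeze2_id s.toList none this (by simp)).symm

-- B's fold computes squeeze2 none ∘ flatMap cmap
/-- Append one character, skipping a hyphen after a hyphen. -/
def app1 (out : List Char) (c : Char) : List Char :=
  if c = '-' ∧ out.getLast? = some '-' then out else out ++ [c]

theorem bstep_eq_foldl_app1 (out : List Char) (ch : Char) :
    bstep out ch = (cmap ch).foldl app1 out := by
  by_cases h1 : ch = ' ' ∨ ch = '/' ∨ ch = '\\'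
  · simp only [bstep, cmap, if_pos h1, List.foldl, app1]
    by_cases hl : out.getLast? = some '-'
    · have hne : out ≠ [] := by intro h; rw [h] at hl; simp at hl
      simp [hl, hne]
    · simp [hl]
  · by_cases h2 : ch = '.' ∨ ch = ',' ∨ ch = '(' ∨ ch = ')'
    · simp [bstep, cmap, h1, h2]
    · by_cases h3 : ch = '&'
      · subst h3
        simp only [bstep, cmap]
        norm_num
        simp [List.foldl, app1]
      · simp only [bstep, cmap, if_neg h1, if_neg h2, if_neg h3, List.foldl, app1]
        by_cases h4 : ch = '-' ∧ out.getLast? = some '-'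
        · have hne : out ≠ [] := by
            intro h; rw [h] at h4; simp at h4
          simp [h4, hne]
        · have h4' : ¬ (ch = '-' ∧ out ≠ [] ∧ out.getLast? = some '-') := by
            rintro ⟨ha, _, hc⟩; exact h4 ⟨ha, hc⟩
          simp [h4, h4']

theorem foldl_bstep_eq (cs : List Char) :
    ∀ out, cs.foldl bstep out = (cs.flatMap cmap).foldl app1 out := by
  induction cs with
  | nil => intro out; simp
  | cons c cs ih =>
    intro out
    simp only [List.foldl_cons, List.flatMap_cons, List.foldl_append]
    rw [bstep_eq_foldl_app1, ih]

theorem foldl_app1_eq (ys : List Char) :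
    ∀ out, ys.foldl app1 out = out ++ squeeze2 out.getLast? ys := by
  induction ys with
  | nil => intro out; simp [squeeze2]
  | cons c t ih =>
    intro out
    simp only [List.foldl_cons]
    by_cases h : c = '-' ∧ out.getLast? = some '-'
    · rw [show app1 out c = out from by simp [app1, h]]
      rw [ih out]
      simp [squeeze2, h]
    · rw [show app1 out c = out ++ [c] from by simp [app1, h]]
      rw [ih (out ++ [c])]
      simp only [squeeze2, if_neg h, List.getLast?_concat]
      simp

theorem core_eq (v : String) :
    (collapseA
        (PySem.Str.replace
          (PySem.Str.replace
            (PySem.Str.replace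
              (PySem.Str.replace
                (PySem.Str.replace
                  (PySem.Str.replace
                    (PySem.Str.replace
                      (PySem.Str.replace (PySem.Str.lower v) " " "-") "&" "and") "." "")
                    "," "") "(" "") ")" "") "/" "-") "\\" "-")).toList
      = (PySem.Chars.lower v.toList).foldl bstep [] := by
  rw [collapseA_toList]
  rw [foldl_bstep_eq, foldl_app1_eq]
  simp only [List.nil_append, List.getLast?_nil]
  refine congrArg (squeeze2 none) ?_
  simp only [PySem.Str.toList_replace, PySem.Str.toList_lower]
  rw [show (" " : String).toList = [' '] from rfl,
      show ("&" : String).toList = ['&'] from rfl,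
      show ("." : String).toList = ['.'] from rfl,
      show ("," : String).toList = [','] from rfl,
      show ("(" : String).toList = ['('] from rfl,
      show (")" : String).toList = [')'] from rfl,
      show ("/" : String).toList = ['/'] from rfl,
      show ("\\" : String).toList = ['\\'] from rfl,
      show ("-" : String).toList = ['-'] from rfl,
      show ("and" : String).toList = ['a','n','d'] from rfl,
      show ("" : String).toList = [] from rfl]
  rw [replace_single, replace_single, replace_single, replace_single,
      replace_single, replace_single, replace_single, replace_single]
  exact chain_eq (PySem.Chars.lower v.toList)

-- ===== VERDICT (by name: the statement is the Claim_ definition above) =====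
theorem create_vendor_slug_spec : Claim_equal_create_vendor_slug := by
  intro v _
  unfold Spec_create_vendor_slug create_vendor_slug create_vendor_slug_alt
  simp only [PySem.Str.stripChars]
  rw [core_eq v]
  rw [show ("-" : String).toList = ['-'] from rfl]
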